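-- pv_equiv track=rewrite | github.com/ejodude/taxonomer_parsing | process_classifier_count.py | process_individual_classify_file_tie
-- ===== SOURCE A (Python) =====
-- import copy
--
-- def process_individual_classify_file_tie( data ):
-- 	"""
-- 	#iterates over file and counts the number of times a read is
-- 	#classfied to each unique ID number. This loop parses output from single
-- 	#classfier database run.
--
-- 	data - taxonomer object data structure with returned classified lines in list format
-- 	id_dict - parsed key file results with counter for read count tracking
-- 	"""
-- 	#print data
-- 	#pull results from itertools
-- 	results = data[0]
-- 	id_dict = data[1]
--
-- 	#process the object and append counters
-- 	RV = copy.deepcopy(id_dict) #dictionary of returned results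
-- 	for result in results: #iterate over lines.
-- 		result = result.split("\t")
-- 		if len(result) == 1: #we are not working with tied output
-- 			#rd = individual_read( result[0] ) #load classified read object
-- 			#RV[ rd.taxid ][1] += 1
-- 			taxid = result[0][2]
-- 			RV[ taxid ][1] += 1
-- 		else: #we are working with tied output and need to append counts to all ties accordingly
-- 			for rds in result: #iterate over ties...
-- 				taxid = result[0][2]
-- 				RV[ taxid ][1] += 1
-- 				#rd = individual_read( rds ) #load classified read object
-- 				#RV[ rd.taxid ][1] += 1 #append counter
--
-- 	return( RV ) #return modified dictioanry with updated counts
-- ===== SOURCE B (Python) =====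
-- import copy
--
-- def process_individual_classify_file_tie(data):
--     # Tally-then-apply: one counter pass over the lines, then one update pass over the dict.
--     results = data[0]
--     id_dict = data[1]
--     # pass 1: tally reads per taxid; a single-field line contributes 1 == len(fields),
--     # a tied line contributes len(fields) (A bumps once per tied field, same taxid each time)
--     counts = {}
--     for line in results:
--         fields = line.split("\t")
--         taxid = fields[0][2]
--         counts[taxid] = counts.get(taxid, 0) + len(fields)
--     # pass 2: apply the tallies to a deep copy of the key dictionary
--     RV = copy.deepcopy(id_dict)
--     for taxid, c in counts.items():
--         RV[taxid][1] += c
--     return RV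
-- ===== Notes on version B (the rewrite author's own statement) =====
-- stated objective: alternative
-- what changed: A's single pass that increments RV[taxid][1] in place (once per tied field, via a nested loop) is replaced by a two-pass tally-then-apply shape: one pass builds a counter dict mapping taxid to len(fields) summed over lines (a single-field line contributes 1 = len), then one pass over the counter's items adds each tally to the copied id_dict.
import Mathlib
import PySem

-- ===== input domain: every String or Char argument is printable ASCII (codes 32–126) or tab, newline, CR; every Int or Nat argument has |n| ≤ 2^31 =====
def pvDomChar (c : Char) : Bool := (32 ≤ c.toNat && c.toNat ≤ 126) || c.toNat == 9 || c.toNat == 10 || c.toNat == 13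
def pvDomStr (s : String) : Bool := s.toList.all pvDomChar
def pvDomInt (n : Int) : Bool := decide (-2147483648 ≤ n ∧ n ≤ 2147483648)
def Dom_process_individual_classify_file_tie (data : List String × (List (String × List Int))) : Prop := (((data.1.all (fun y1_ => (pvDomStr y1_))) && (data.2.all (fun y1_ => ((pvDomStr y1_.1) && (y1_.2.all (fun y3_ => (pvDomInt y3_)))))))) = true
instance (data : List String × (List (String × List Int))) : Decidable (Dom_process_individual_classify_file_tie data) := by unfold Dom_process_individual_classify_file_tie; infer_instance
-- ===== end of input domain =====

-- B replaces A's single in-place accumulation pass (nested loop over tied fields) by a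
-- tally-then-apply two-pass shape: a counter keyed by taxid is built first, then applied
-- to the copied dictionary.  Equivalence of the RETURN value is proved on Pre_.

-- `RV[t][1] += n` on the items list of a Python dict (keys unique, so first match is the
-- entry).  Exact when `t` is a key whose value list has length ≥ 2 — guaranteed by Pre_
-- (on a missing key Python raises KeyError, on a short list IndexError).
def pvBump : List (String × List Int) → String → Int → List (String × List Int)
  | [], _, _ => []
  | (k, v) :: rest, t, n =>
    if k = t then (k, v.set 1 (v.getD 1 0 + n)) :: rest
    else (k, v) :: pvBump rest t n

-- ===== PORT A =====
-- loop body of A: split the line, and bump RV[taxid][1] once (single field) or once per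
-- tied field (taxid recomputed from result[0][2] each iteration, as in A).
-- split? is total here ("\t" ≠ "" ⇒ always some); result is never empty, headD "" = result[0].
def pvAStep (rv : List (String × List Int)) (line : String) : List (String × List Int) :=
  let result := (PySem.Str.split? line "\t").getD [""]
  if result.length = 1 then
    match PySem.Str.pyGet? (result.headD "") 2 with
    | some ch => pvBump rv (String.singleton ch) 1
    | none => rv            -- IndexError in Python; excluded by Pre_
  else
    result.foldl (fun rv' _rds =>
      match PySem.Str.pyGet? (result.headD "") 2 with
      | some ch => pvBump rv' (String.singleton ch) 1
      | none => rv') rv     -- IndexError in Python; excluded by Pre_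

def process_individual_classify_file_tie (data : List String × (List (String × List Int))) : List (String × List Int) :=
  -- RV = copy.deepcopy(id_dict): the dict data.2 stands for, then the accumulation loop
  (data.1.foldl pvAStep (PySem.Dict.ofList data.2).items)

-- ===== PORT B =====
-- `counts[t] = counts.get(t, 0) + n` on a Python dict as items list (update in place, new key appends).
def pvCAdd : List (String × Int) → String → Int → List (String × Int)
  | [], t, n => [(t, n)]
  | (k, m) :: rest, t, n =>
    if k = t then (k, m + n) :: rest
    else (k, m) :: pvCAdd rest t n

-- pass 1 body: tally len(fields) for the line's taxid
def pvCountStep (c : List (String × Int)) (line : String) : List (String × Int) :=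
  let fields := (PySem.Str.split? line "\t").getD [""]
  match PySem.Str.pyGet? (fields.headD "") 2 with
  | some ch => pvCAdd c (String.singleton ch) (fields.length : Int)
  | none => c               -- IndexError in Python; excluded by Pre_

-- pass 2 body: RV[taxid][1] += count
def pvApplyStep (rv : List (String × List Int)) (tc : String × Int) : List (String × List Int) :=
  pvBump rv tc.1 tc.2

def process_individual_classify_file_tie_alt (data : List String × (List (String × List Int))) : List (String × List Int) :=
  (data.1.foldl pvCountStep []).foldl pvApplyStep (PySem.Dict.ofList data.2).items

-- ===== PRECONDITION & SPEC =====
-- Pre_ excludes exactly the inputs on which the Python A raises: a line whose first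
-- tab-field has fewer than 3 characters (IndexError), whose taxid character is not a key
-- of id_dict (KeyError), or whose value list there has fewer than 2 entries (IndexError).
def pvLineOK (d : PySem.Dict String (List Int)) (line : String) : Bool :=
  match PySem.Str.pyGet? (((PySem.Str.split? line "\t").getD [""]).headD "") 2 with
  | some ch =>
    match d.get? (String.singleton ch) with
    | some v => decide (2 ≤ v.length)
    | none => false
  | none => false

def Pre_process_individual_classify_file_tie (data : List String × (List (String × List Int))) : Prop :=
  data.1.all (pvLineOK (PySem.Dict.ofList data.2)) = true
instance (data : List String × (List (String × List Int))) : Decidable (Pre_process_individual_classify_file_tie data) := by unfold Pre_process_individual_classify_file_tie; infer_instance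

def pvWitness_process_individual_classify_file_tie : (List String × (List (String × List Int))) :=
  (["ab1", "cd1\tef1", "xy2"], [("1", [0, 0]), ("2", [0, 5])])

def Spec_process_individual_classify_file_tie (data : List String × (List (String × List Int))) (out : List (String × List Int)) : Prop := out = process_individual_classify_file_tie_alt data
instance (data : List String × (List (String × List Int))) (out : List (String × List Int)) : Decidable (Spec_process_individual_classify_file_tie data out) := by unfold Spec_process_individual_classify_file_tie; infer_instance

-- ===== CLAIM (what is proved, stated in full; the proofs are below) =====
def Claim_equal_process_individual_classify_file_tie : Prop := ∀ (data : List String × (List (String × List Int))), Dom_process_individual_classify_file_tie data → Pre_process_individual_classify_file_tie data → Spec_process_individual_classify_file_tie data (process_individual_classify_file_tie data)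

-- ===== LEMMAS AND PROOFS =====

theorem pvFoldl_const {α β : Type} (l : List α) (s : β) :
    l.foldl (fun s _ => s) s = s := by
  induction l generalizing s with
  | nil => rfl
  | cons x xs ih => exact ih s

theorem pvBump_zero (rv : List (String × List Int)) (t : String) :
    pvBump rv t 0 = rv := by
  induction rv with
  | nil => rfl
  | cons p rest ih =>
    obtain ⟨k, v⟩ := p
    by_cases hk : k = t
    · rcases v with _ | ⟨a, _ | ⟨b, tl⟩⟩ <;> simp [pvBump, hk, List.set, List.getD]
    · simp [pvBump, hk, ih]

theorem pvBump_add (rv : List (String × List Int)) (t : String) (m n : Int) :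
    pvBump (pvBump rv t m) t n = pvBump rv t (m + n) := by
  induction rv with
  | nil => rfl
  | cons p rest ih =>
    obtain ⟨k, v⟩ := p
    by_cases hk : k = t
    · rcases v with _ | ⟨a, _ | ⟨b, tl⟩⟩ <;>
        simp [pvBump, hk, List.set, List.getD] <;> ring
    · simp [pvBump, hk, ih]

theorem pvBump_comm (rv : List (String × List Int)) (t t' : String) (n n' : Int) :
    pvBump (pvBump rv t n) t' n' = pvBump (pvBump rv t' n') t n := by
  by_cases htt : t = t'
  · subst htt; rw [pvBump_add, pvBump_add, Int.add_comm]
  · induction rv with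
    | nil => rfl
    | cons p rest ih =>
      obtain ⟨k, v⟩ := p
      by_cases hk : k = t <;> by_cases hk' : k = t'
      · exact absurd (hk ▸ hk') htt
      · simp [pvBump, hk, hk', htt, Ne.symm htt]
      · simp [pvBump, hk, hk', htt, Ne.symm htt]
      · simp [pvBump, hk, hk', ih]

theorem pvFoldl_bump_comm (L : List (String × Int)) (rv : List (String × List Int))
    (t : String) (n : Int) :
    L.foldl pvApplyStep (pvBump rv t n) = pvBump (L.foldl pvApplyStep rv) t n := by
  induction L generalizing rv with
  | nil => rfl
  | cons tc L' ih =>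
    simp only [List.foldl_cons, pvApplyStep]
    rw [pvBump_comm, ih]

theorem pvCAdd_apply (c : List (String × Int)) (rv : List (String × List Int))
    (t : String) (n : Int) :
    (pvCAdd c t n).foldl pvApplyStep rv = pvBump (c.foldl pvApplyStep rv) t n := by
  induction c generalizing rv with
  | nil => simp [pvCAdd, pvApplyStep]
  | cons p rest ih =>
    obtain ⟨k, m⟩ := p
    by_cases hk : k = t
    · subst hk
      rw [show pvCAdd ((k, m) :: rest) k n = (k, m + n) :: rest by simp [pvCAdd]]
      simp only [List.foldl_cons, pvApplyStep]
      rw [← pvBump_add, pvFoldl_bump_comm]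
    · simp only [pvCAdd, if_neg hk, List.foldl_cons, pvApplyStep, ih]

theorem pvInnerFold (result : List String) (rv : List (String × List Int)) (t : String) :
    result.foldl (fun rv' _ => pvBump rv' t 1) rv = pvBump rv t (result.length : Int) := by
  induction result generalizing rv with
  | nil => simp [pvBump_zero]
  | cons x xs ih =>
    simp only [List.foldl_cons, ih, pvBump_add, List.length_cons]
    congr 1
    push_cast
    ring

theorem pvStep_eq (c : List (String × Int)) (rv : List (String × List Int)) (line : String) :
    (pvCountStep c line).foldl pvApplyStep rv = pvAStep (c.foldl pvApplyStep rv) line := by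
  simp only [pvCountStep, pvAStep]
  cases h : PySem.Str.pyGet? (((PySem.Str.split? line "\t").getD [""]).headD "") 2 with
  | none =>
    simp only [h]
    split
    · rfl
    · exact (pvFoldl_const _ _).symm
  | some ch =>
    simp only [h, pvCAdd_apply]
    split
    · rename_i hlen
      rw [hlen]
      rfl
    · rw [pvInnerFold]

theorem pvMain (results : List String) (c : List (String × Int)) (rv : List (String × List Int)) :
    (results.foldl pvCountStep c).foldl pvApplyStep rv
      = results.foldl pvAStep (c.foldl pvApplyStep rv) := by
  induction results generalizing c rv with
  | nil => rfl
  | cons line rest ih =>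
    simp only [List.foldl_cons, ih, pvStep_eq]

-- ===== VERDICT (by name: the statement is the Claim_ definition above) =====
theorem process_individual_classify_file_tie_spec : Claim_equal_process_individual_classify_file_tie := by
  intro data _ _
  unfold Spec_process_individual_classify_file_tie
  unfold process_individual_classify_file_tie process_individual_classify_file_tie_alt
  rw [pvMain]
  rfl
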